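-- pv_equiv track=rewrite | github.com/adarshmodh/Data-Structures-Algorithms-in-Python | graphs/track_friend_groups.py | track_friend_groups
-- ===== SOURCE A (Python) =====
-- from collections import defaultdict
--
-- def dfs(graph, node, visited):
--     visited.add(node)
--     size = 1
--     for nei in graph[node]:
--         if nei not in visited:
--             size += dfs(graph, nei, visited)
--     return size
--
-- def track_friend_groups(n, queryType, students1, students2):
--     graph = defaultdict(set)
--     results = []
--
--     for q, a, b in zip(queryType, students1, students2):
--         if q == "Friend":
--             graph[a].add(b)
--             graph[b].add(a)
--         elif q == "Total":
--             visited = set()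
--             size_a = dfs(graph, a, visited)
--             # reuse visited so we don't double count if a and b are connected
--             size_b = dfs(graph, b, visited) if b not in visited else 0
--             results.append(size_a + size_b)
--
--     return results
-- ===== SOURCE B (Python) =====
-- def track_friend_groups(n, queryType, students1, students2):
--     # Union-find with direct root pointers and per-root member sets
--     # (smaller group repointed into larger): Total queries are answered by lookups.
--     rep = {}       # node -> representative of its group (absent = itself)
--     members = {}   # representative -> set of group members (absent = singleton)
--     results = []
--     for q, a, b in zip(queryType, students1, students2):
--         ra = rep.get(a, a)
--         rb = rep.get(b, b)
--         if q == "Friend":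
--             if ra != rb:
--                 sa = members.get(ra, {ra})
--                 sb = members.get(rb, {rb})
--                 if len(sa) < len(sb):
--                     ra, rb, sa, sb = rb, ra, sb, sa
--                 for x in sb:
--                     rep[x] = ra
--                 members[ra] = sa | sb
--                 members.pop(rb, None)
--         elif q == "Total":
--             size = len(members.get(ra, {ra}))
--             if rb != ra:
--                 size += len(members.get(rb, {rb}))
--             results.append(size)
--     return results
-- ===== Notes on version B (the rewrite author's own statement) =====
-- stated objective: alternative
-- what changed: Replaces per-Total-query DFS over an adjacency-set graph with an incrementally maintained union-find (direct root pointers plus per-root member sets, smaller group repointed into larger), so each Total query is answered by dictionary/size lookups instead of graph traversals.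
import Mathlib
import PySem

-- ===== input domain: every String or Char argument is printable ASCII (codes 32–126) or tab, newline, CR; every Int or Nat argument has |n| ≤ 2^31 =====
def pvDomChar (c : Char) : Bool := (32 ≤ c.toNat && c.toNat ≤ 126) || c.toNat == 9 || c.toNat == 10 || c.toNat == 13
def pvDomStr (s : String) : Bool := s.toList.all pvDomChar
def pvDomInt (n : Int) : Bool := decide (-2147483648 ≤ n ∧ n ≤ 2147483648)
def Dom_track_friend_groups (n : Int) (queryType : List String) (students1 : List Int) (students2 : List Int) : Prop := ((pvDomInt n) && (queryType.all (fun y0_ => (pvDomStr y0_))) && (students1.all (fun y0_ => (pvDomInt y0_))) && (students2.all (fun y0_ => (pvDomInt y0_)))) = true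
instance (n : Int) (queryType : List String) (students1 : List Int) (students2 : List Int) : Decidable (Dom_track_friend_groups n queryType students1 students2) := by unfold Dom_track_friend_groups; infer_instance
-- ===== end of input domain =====

-- B replaces A's per-"Total"-query DFS with an incrementally maintained union-find
-- (root-pointer dict + per-root member sets, smaller group repointed into larger),
-- answering each "Total" query by dictionary lookups (objective: alternative).

-- ===== PORT A =====
-- Python set literal {r}
def pySingleton (r : Int) : PySem.Set Int := PySem.Set.add PySem.Set.empty r

-- recursive dfs of Source A; fuel only makes the recursion structurally terminating
-- (callers pass fuel > number of keys, which the proofs show is never exhausted)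
def dfsA (graph : PySem.Dict Int (PySem.Set Int)) : Nat → Int → PySem.Set Int → Int × PySem.Set Int
  | 0, _, visited => (0, visited)
  | fuel+1, node, visited =>
    (graph.getD node PySem.Set.empty).foldl
      (fun st nei =>
        if nei ∈ st.2 then st
        else
          let r := dfsA graph fuel nei st.2
          (st.1 + r.1, r.2))
      (1, PySem.Set.add visited node)

def stepA (st : PySem.Dict Int (PySem.Set Int) × List Int) (q : String × Int × Int) :
    PySem.Dict Int (PySem.Set Int) × List Int :=
  let graph := st.1
  let qt := q.1
  let a := q.2.1
  let b := q.2.2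
  if qt = "Friend" then
    -- graph[a].add(b); graph[b].add(a)
    let g1 := graph.insert a ((graph.getD a PySem.Set.empty).add b)
    let g2 := g1.insert b ((g1.getD b PySem.Set.empty).add a)
    (g2, st.2)
  else if qt = "Total" then
    let fuel := graph.keys.length + 1
    let ra := dfsA graph fuel a PySem.Set.empty
    let rb := if b ∈ ra.2 then ((0 : Int), ra.2) else dfsA graph fuel b ra.2
    (graph, st.2 ++ [ra.1 + rb.1])
  else st

def track_friend_groups (n : Int) (queryType : List String) (students1 : List Int) (students2 : List Int) : List Int :=
  ((queryType.zip (students1.zip students2)).foldl stepA (PySem.Dict.empty, [])).2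

-- ===== PORT B =====
def stepB (st : (PySem.Dict Int Int × PySem.Dict Int (PySem.Set Int)) × List Int) (q : String × Int × Int) :
    (PySem.Dict Int Int × PySem.Dict Int (PySem.Set Int)) × List Int :=
  let rep := st.1.1
  let members := st.1.2
  let qt := q.1
  let a := q.2.1
  let b := q.2.2
  let ra := rep.getD a a
  let rb := rep.getD b b
  if qt = "Friend" then
    if ra ≠ rb then
      let sa := members.getD ra (pySingleton ra)
      let sb := members.getD rb (pySingleton rb)
      let wlp := if sa.length < sb.length then ((rb, ra), (sb, sa)) else ((ra, rb), (sa, sb))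
      let w := wlp.1.1
      let l := wlp.1.2
      let sw := wlp.2.1
      let sl := wlp.2.2
      let rep' := sl.foldl (fun r x => r.insert x w) rep
      let members' := (members.insert w (PySem.Set.union sw sl)).erase l
      ((rep', members'), st.2)
    else st
  else if qt = "Total" then
    let size : Int := ((members.getD ra (pySingleton ra)).length : Int)
    let size := if rb ≠ ra then size + ((members.getD rb (pySingleton rb)).length : Int) else size
    (st.1, st.2 ++ [size])
  else st

def track_friend_groups_alt (n : Int) (queryType : List String) (students1 : List Int) (students2 : List Int) : List Int :=
  ((queryType.zip (students1.zip students2)).foldl stepB ((PySem.Dict.empty, PySem.Dict.empty), [])).2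

-- ===== PRECONDITION & SPEC =====
def Spec_track_friend_groups (n : Int) (queryType : List String) (students1 : List Int) (students2 : List Int) (out : List Int) : Prop := out = track_friend_groups_alt n queryType students1 students2
instance (n : Int) (queryType : List String) (students1 : List Int) (students2 : List Int) (out : List Int) : Decidable (Spec_track_friend_groups n queryType students1 students2 out) := by unfold Spec_track_friend_groups; infer_instance

-- ===== CLAIM (what is proved, stated in full; the proofs are below) =====
def Claim_equal_track_friend_groups : Prop := ∀ (n : Int) (queryType : List String) (students1 : List Int) (students2 : List Int), Dom_track_friend_groups n queryType students1 students2 → Spec_track_friend_groups n queryType students1 students2 (track_friend_groups n queryType students1 students2)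

-- ===== LEMMAS AND PROOFS =====

-- 'x and y are joined by one of the edges recorded so far' and its reflexive-transitive closure
def ERel (E : List (Int × Int)) (x y : Int) : Prop := (x, y) ∈ E ∨ (y, x) ∈ E
def Conn (E : List (Int × Int)) : Int → Int → Prop := Relation.ReflTransGen (ERel E)

-- adjacency in A's graph dict and its closure
def Adj (graph : PySem.Dict Int (PySem.Set Int)) (x y : Int) : Prop := y ∈ graph.getD x PySem.Set.empty
def CG (graph : PySem.Dict Int (PySem.Set Int)) : Int → Int → Prop := Relation.ReflTransGen (Adj graph)

-- invariant of A's graph: nodup keys, membership = recorded edges (symmetric)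
def GInv (graph : PySem.Dict Int (PySem.Set Int)) (E : List (Int × Int)) : Prop :=
  graph.keys.Nodup ∧ ∀ x y, Adj graph x y ↔ ERel E x y

-- invariant of B's union-find state
def BInv (rep : PySem.Dict Int Int) (members : PySem.Dict Int (PySem.Set Int)) (E : List (Int × Int)) : Prop :=
  (∀ x, rep.getD (rep.getD x x) (rep.getD x x) = rep.getD x x) ∧
  (∀ x y, Conn E x y ↔ rep.getD x x = rep.getD y y) ∧
  (∀ x y, y ∈ members.getD (rep.getD x x) (pySingleton (rep.getD x x)) ↔ Conn E x y) ∧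
  (∀ x, (members.getD (rep.getD x x) (pySingleton (rep.getD x x))).Nodup)

theorem conn_symm {E : List (Int × Int)} {x y : Int} (h : Conn E x y) : Conn E y x :=
  (Relation.ReflTransGen.symmetric (fun _ _ h => Or.symm h)) h

theorem conn_nil {x y : Int} : Conn [] x y ↔ x = y := by
  constructor
  · intro h
    induction h with
    | refl => rfl
    | tail _ h2 ih => rcases h2 with h | h <;> simp at h
  · rintro rfl; exact Relation.ReflTransGen.refl

theorem conn_mono {E E' : List (Int × Int)} (hsub : ∀ p ∈ E, p ∈ E') {x y : Int}
    (h : Conn E x y) : Conn E' x y := by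
  refine Relation.ReflTransGen.mono ?_ h
  intro u v huv
  rcases huv with h | h
  · exact Or.inl (hsub _ h)
  · exact Or.inr (hsub _ h)

theorem conn_append {E : List (Int × Int)} {a b x y : Int} :
    Conn (E ++ [(a, b)]) x y ↔
      Conn E x y ∨ (Conn E x a ∧ Conn E b y) ∨ (Conn E x b ∧ Conn E a y) := by
  constructor
  · intro h
    induction h with
    | refl => exact Or.inl Relation.ReflTransGen.refl
    | @tail u c h1 h2 ih =>
      have h2' : ERel E u c ∨ (u = a ∧ c = b) ∨ (u = b ∧ c = a) := by
        rcases h2 with h | h <;> rcases List.mem_append.1 h with h | h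
        · exact Or.inl (Or.inl h)
        · simp at h; exact Or.inr (Or.inl ⟨h.1, h.2⟩)
        · exact Or.inl (Or.inr h)
        · simp at h; exact Or.inr (Or.inr ⟨h.2, h.1⟩)
      rcases ih with i1 | ⟨ixa, ibu⟩ | ⟨ixb, iau⟩
      · rcases h2' with s | ⟨rfl, rfl⟩ | ⟨rfl, rfl⟩
        · exact Or.inl (i1.tail s)
        · exact Or.inr (Or.inl ⟨i1, Relation.ReflTransGen.refl⟩)
        · exact Or.inr (Or.inr ⟨i1, Relation.ReflTransGen.refl⟩)
      · rcases h2' with s | ⟨rfl, rfl⟩ | ⟨rfl, rfl⟩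
        · exact Or.inr (Or.inl ⟨ixa, ibu.tail s⟩)
        · exact Or.inr (Or.inl ⟨ixa, Relation.ReflTransGen.refl⟩)
        · exact Or.inl ixa
      · rcases h2' with s | ⟨rfl, rfl⟩ | ⟨rfl, rfl⟩
        · exact Or.inr (Or.inr ⟨ixb, iau.tail s⟩)
        · exact Or.inl ixb
        · exact Or.inr (Or.inr ⟨ixb, Relation.ReflTransGen.refl⟩)
  · have hsub : ∀ p ∈ E, p ∈ E ++ [(a, b)] := fun p hp => List.mem_append.2 (Or.inl hp)
    have hab : Conn (E ++ [(a, b)]) a b :=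
      Relation.ReflTransGen.single (Or.inl (List.mem_append.2 (Or.inr (by simp))))
    have hba : Conn (E ++ [(a, b)]) b a :=
      Relation.ReflTransGen.single (Or.inr (List.mem_append.2 (Or.inr (by simp))))
    rintro (h | ⟨h1, h2⟩ | ⟨h1, h2⟩)
    · exact conn_mono hsub h
    · exact ((conn_mono hsub h1).trans hab).trans (conn_mono hsub h2)
    · exact ((conn_mono hsub h1).trans hba).trans (conn_mono hsub h2)

theorem cg_iff_conn {graph : PySem.Dict Int (PySem.Set Int)} {E : List (Int × Int)}
    (h : ∀ x y, Adj graph x y ↔ ERel E x y) (x y : Int) : CG graph x y ↔ Conn E x y := by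
  have he : Adj graph = ERel E := funext fun u => funext fun v => propext (h u v)
  unfold CG Conn
  rw [he]

theorem ginv_friend {graph : PySem.Dict Int (PySem.Set Int)} {E : List (Int × Int)} (a b : Int)
    (hG : GInv graph E) :
    GInv ((graph.insert a ((graph.getD a PySem.Set.empty).add b)).insert b
      ((((graph.insert a ((graph.getD a PySem.Set.empty).add b))).getD b PySem.Set.empty).add a))
      (E ++ [(a, b)]) := by
  obtain ⟨hnk, hmem⟩ := hG
  refine ⟨PySem.Dict.nodup_keys_insert _ _ _ (PySem.Dict.nodup_keys_insert _ _ _ hnk), ?_⟩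
  intro x y
  have herel : ERel (E ++ [(a, b)]) x y ↔ ERel E x y ∨ (x = a ∧ y = b) ∨ (x = b ∧ y = a) := by
    unfold ERel
    simp only [List.mem_append, List.mem_singleton, Prod.ext_iff]
    tauto
  rw [herel]
  have hxy := hmem x y
  have hay := hmem a y
  have hby := hmem b y
  unfold Adj at *
  simp only [PySem.Dict.getD_insert]
  by_cases hxb : x = b <;> by_cases hxa : x = a <;> by_cases hab : a = b <;>
    simp_all [PySem.Set.mem_add] <;> tauto

theorem getD_foldl_insert_const (w : Int) (L : List Int) (rep : PySem.Dict Int Int) (y : Int) :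
    (L.foldl (fun r x => r.insert x w) rep).getD y y = if y ∈ L then w else rep.getD y y := by
  induction L generalizing rep with
  | nil => simp
  | cons x L ih =>
    simp only [List.foldl_cons, ih, PySem.Dict.getD_insert]
    by_cases h1 : y ∈ L <;> by_cases h2 : y = x <;> simp [h1, h2]

theorem binv_same {rep : PySem.Dict Int Int} {members : PySem.Dict Int (PySem.Set Int)}
    {E : List (Int × Int)} {a b : Int} (hB : BInv rep members E)
    (heq : rep.getD a a = rep.getD b b) : BInv rep members (E ++ [(a, b)]) := by
  obtain ⟨hid, hroot, hmem, hnd⟩ := hB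
  have hconnab : Conn E a b := (hroot a b).mpr heq
  have hE : ∀ x y, Conn (E ++ [(a, b)]) x y ↔ Conn E x y := by
    intro x y
    rw [conn_append]
    constructor
    · rintro (h | ⟨h1, h2⟩ | ⟨h1, h2⟩)
      · exact h
      · exact h1.trans (hconnab.trans h2)
      · exact h1.trans ((conn_symm hconnab).trans h2)
    · exact Or.inl
  exact ⟨hid, fun x y => (hE x y).trans (hroot x y),
    fun x y => (hmem x y).trans ((hE x y).symm), hnd⟩

theorem find?_filter_ne {ν : Type} (k k' : Int) (h : k' ≠ k) (ps : List (Int × ν)) :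
    List.find? (fun p => p.1 == k') (ps.filter (fun p => !(p.1 == k))) = List.find? (fun p => p.1 == k') ps := by
  induction ps with
  | nil => rfl
  | cons p ps ih =>
    rw [List.filter_cons]
    by_cases h1 : p.1 = k
    · have h2 : (p.1 == k') = false := by simp [h1, Ne.symm h]
      have h3 : (k == k') = false := by simp [Ne.symm h]
      simp [h1, h3, ih]
    · by_cases h2 : p.1 = k'
      · simp [h2, h, List.find?_cons]
      · simp [h1, h2, h, List.find?_cons, ih]

theorem getD_erase_of_ne {ν : Type} (d : PySem.Dict Int ν) (k k' : Int) (v : ν) (h : k' ≠ k) :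
    (d.erase k).getD k' v = d.getD k' v := by
  obtain ⟨items⟩ := d
  show (Option.map _ (List.find? _ (items.filter _))).getD v = _
  rw [find?_filter_ne k k' h]
  rfl

theorem binv_merge {rep : PySem.Dict Int Int} {members : PySem.Dict Int (PySem.Set Int)}
    {E : List (Int × Int)} {a b : Int} (hB : BInv rep members E)
    (hne : rep.getD a a ≠ rep.getD b b) (w l : Int)
    (hwl : (w = rep.getD a a ∧ l = rep.getD b b) ∨ (w = rep.getD b b ∧ l = rep.getD a a)) :
    BInv ((members.getD l (pySingleton l)).foldl (fun r x => r.insert x w) rep)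
      ((members.insert w (PySem.Set.union (members.getD w (pySingleton w)) (members.getD l (pySingleton l)))).erase l)
      (E ++ [(a, b)]) := by
  obtain ⟨hid, hroot, hmem, hnd⟩ := hB
  have key : ∀ r c, r = rep.getD c c →
      ∀ y, (y ∈ members.getD r (pySingleton r) ↔ rep.getD y y = r) := by
    intro r c hrc y
    subst hrc
    exact (hmem c y).trans ((hroot c y).trans eq_comm)
  have hwr : rep.getD w w = w := by
    rcases hwl with ⟨rfl, _⟩ | ⟨rfl, _⟩
    exacts [hid a, hid b]
  have hwl_ne : w ≠ l := by
    rcases hwl with ⟨rfl, rfl⟩ | ⟨rfl, rfl⟩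
    exacts [hne, fun h => hne h.symm]
  have hmemw : ∀ y, y ∈ members.getD w (pySingleton w) ↔ rep.getD y y = w := by
    rcases hwl with ⟨hw, _⟩ | ⟨hw, _⟩
    exacts [key w a hw, key w b hw]
  have hmeml : ∀ y, y ∈ members.getD l (pySingleton l) ↔ rep.getD y y = l := by
    rcases hwl with ⟨_, hl⟩ | ⟨_, hl⟩
    exacts [key l b hl, key l a hl]
  have hndw : (members.getD w (pySingleton w)).Nodup := by
    rcases hwl with ⟨rfl, _⟩ | ⟨rfl, _⟩
    exacts [hnd a, hnd b]
  have hR : ∀ y, ((members.getD l (pySingleton l)).foldl (fun r x => r.insert x w) rep).getD y y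
      = if rep.getD y y = l then w else rep.getD y y := by
    intro y
    rw [getD_foldl_insert_const]
    by_cases h : y ∈ members.getD l (pySingleton l)
    · rw [if_pos h, if_pos ((hmeml y).1 h)]
    · rw [if_neg h, if_neg (fun hc => h ((hmeml y).2 hc))]
  have hconn' : ∀ x y, Conn (E ++ [(a, b)]) x y ↔
      (rep.getD x x = rep.getD y y ∨
       (rep.getD x x = w ∧ rep.getD y y = l) ∨ (rep.getD x x = l ∧ rep.getD y y = w)) := by
    intro x y
    rw [conn_append]
    have e1 := hroot x y
    have e2 := hroot x a
    have e3 := hroot b y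
    have e4 := hroot x b
    have e5 := hroot a y
    rw [e1, e2, e3, e4, e5]
    rcases hwl with ⟨hw, hl⟩ | ⟨hw, hl⟩ <;> rw [← hw, ← hl] <;>
      constructor <;> intro h <;> rcases h with h | ⟨h1, h2⟩ | ⟨h1, h2⟩ <;> omega
  -- the membership content of the updated members dict at an l/w-rooted key
  have hunion : ∀ y, y ∈ PySem.Set.union (members.getD w (pySingleton w)) (members.getD l (pySingleton l)) ↔
      (rep.getD y y = w ∨ rep.getD y y = l) := by
    intro y
    rw [PySem.Set.mem_union, hmemw y, hmeml y]
  have hgetw : ∀ (dflt : PySem.Set Int),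
      (((members.insert w (PySem.Set.union (members.getD w (pySingleton w)) (members.getD l (pySingleton l)))).erase l).getD w dflt)
        = PySem.Set.union (members.getD w (pySingleton w)) (members.getD l (pySingleton l)) := by
    intro dflt
    rw [getD_erase_of_ne _ _ _ _ hwl_ne, PySem.Dict.getD_insert_self]
  have hgetother : ∀ (r : Int) (dflt : PySem.Set Int), r ≠ l → r ≠ w →
      (((members.insert w (PySem.Set.union (members.getD w (pySingleton w)) (members.getD l (pySingleton l)))).erase l).getD r dflt)
        = members.getD r dflt := by
    intro r dflt h1 h2
    rw [getD_erase_of_ne _ _ _ _ h1, PySem.Dict.getD_insert, if_neg h2]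
  refine ⟨?_, ?_, ?_, ?_⟩
  · intro x
    rw [hR, hR]
    by_cases hx : rep.getD x x = l <;> simp [hx, hwr, hwl_ne, hid x]
  · intro x y
    rw [hconn', hR, hR]
    have hne' : w ≠ l := hwl_ne
    by_cases hx : rep.getD x x = l <;> by_cases hy : rep.getD y y = l
    · rw [if_pos hx, if_pos hy]
      constructor <;> intro h <;> omega
    · rw [if_pos hx, if_neg hy]
      constructor <;> intro h <;> omega
    · rw [if_neg hx, if_pos hy]
      constructor <;> intro h <;> omega
    · rw [if_neg hx, if_neg hy]
      constructor <;> intro h <;> omega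
  · intro x y
    rw [hconn' x y, hR x]
    by_cases hx : rep.getD x x = l
    · rw [if_pos hx, hgetw, hunion y]
      rw [hx]
      have := hwl_ne
      constructor <;> intro h <;> omega
    · rw [if_neg hx]
      by_cases hxw : rep.getD x x = w
      · rw [hxw, hgetw, hunion y]
        have := hwl_ne
        constructor <;> intro h <;> omega
      · rw [hgetother _ _ hx hxw, key (rep.getD x x) x rfl y]
        constructor <;> intro h <;> omega
  · intro x
    rw [hR x]
    by_cases hx : rep.getD x x = l
    · rw [if_pos hx, hgetw]
      exact PySem.Set.nodup_union _ _ hndw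
    · rw [if_neg hx]
      by_cases hxw : rep.getD x x = w
      · rw [hxw, hgetw]
        exact PySem.Set.nodup_union _ _ hndw
      · rw [hgetother _ _ hx hxw]
        exact hnd x

theorem filterlen_anti (keys : List Int) {W W' : List Int} (h : ∀ x ∈ W, x ∈ W') :
    (keys.filter (fun k => decide (k ∉ W'))).length ≤ (keys.filter (fun k => decide (k ∉ W))).length :=
  (List.monotone_filter_right keys (fun a ha => by
    simp only [decide_eq_true_eq] at ha ⊢
    exact fun hm => ha (h a hm))).length_le

theorem dfs_fold {graph : PySem.Dict Int (PySem.Set Int)} (fuel : Nat)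
    (IH : ∀ (node : Int) (V : PySem.Set Int), V.Nodup → node ∉ V →
      (graph.keys.filter (fun k => decide (k ∉ V))).length + 1 ≤ fuel →
      V <+: (dfsA graph fuel node V).2 ∧ node ∈ (dfsA graph fuel node V).2 ∧
      (dfsA graph fuel node V).2.Nodup ∧
      (dfsA graph fuel node V).1 = ((dfsA graph fuel node V).2.length : Int) - (V.length : Int) ∧
      (∀ x ∈ (dfsA graph fuel node V).2, x ∈ V ∨ CG graph node x) ∧
      (∀ x ∈ (dfsA graph fuel node V).2, x ∉ V → ∀ y, Adj graph x y → y ∈ (dfsA graph fuel node V).2)) :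
    ∀ (ns : List Int) (node : Int) (V : PySem.Set Int) (st : Int × PySem.Set Int),
      (∀ x ∈ ns, Adj graph node x) →
      V <+: st.2 → node ∈ st.2 → st.2.Nodup →
      st.1 = (st.2.length : Int) - (V.length : Int) →
      (∀ x ∈ st.2, x ∈ V ∨ CG graph node x) →
      (∀ x ∈ st.2, x ∉ V → x ≠ node → ∀ y, Adj graph x y → y ∈ st.2) →
      (graph.keys.filter (fun k => decide (k ∉ st.2))).length + 1 ≤ fuel →
      st.2 <+: (ns.foldl (fun st nei => if nei ∈ st.2 then st else
          let r := dfsA graph fuel nei st.2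
          (st.1 + r.1, r.2)) st).2 ∧
      (∀ x ∈ ns, x ∈ (ns.foldl (fun st nei => if nei ∈ st.2 then st else
          let r := dfsA graph fuel nei st.2
          (st.1 + r.1, r.2)) st).2) ∧
      node ∈ (ns.foldl (fun st nei => if nei ∈ st.2 then st else
          let r := dfsA graph fuel nei st.2
          (st.1 + r.1, r.2)) st).2 ∧
      (ns.foldl (fun st nei => if nei ∈ st.2 then st else
          let r := dfsA graph fuel nei st.2
          (st.1 + r.1, r.2)) st).2.Nodup ∧
      (ns.foldl (fun st nei => if nei ∈ st.2 then st else
          let r := dfsA graph fuel nei st.2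
          (st.1 + r.1, r.2)) st).1 =
        (((ns.foldl (fun st nei => if nei ∈ st.2 then st else
          let r := dfsA graph fuel nei st.2
          (st.1 + r.1, r.2)) st).2.length : Int)) - (V.length : Int) ∧
      (∀ x ∈ (ns.foldl (fun st nei => if nei ∈ st.2 then st else
          let r := dfsA graph fuel nei st.2
          (st.1 + r.1, r.2)) st).2, x ∈ V ∨ CG graph node x) ∧
      (∀ x ∈ (ns.foldl (fun st nei => if nei ∈ st.2 then st else
          let r := dfsA graph fuel nei st.2
          (st.1 + r.1, r.2)) st).2, x ∉ V → x ≠ node → ∀ y, Adj graph x y →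
            y ∈ (ns.foldl (fun st nei => if nei ∈ st.2 then st else
              let r := dfsA graph fuel nei st.2
              (st.1 + r.1, r.2)) st).2) ∧
      (graph.keys.filter (fun k => decide (k ∉ (ns.foldl (fun st nei => if nei ∈ st.2 then st else
          let r := dfsA graph fuel nei st.2
          (st.1 + r.1, r.2)) st).2))).length + 1 ≤ fuel := by
  intro ns
  induction ns with
  | nil =>
    intro node V st hAdj h1 h2 h3 h4 h5 h6 h7
    refine ⟨List.prefix_refl _, by simp, h2, h3, h4, h5, h6, h7⟩
  | cons nei ns ih =>
    intro node V st hAdj h1 h2 h3 h4 h5 h6 h7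
    simp only [List.foldl_cons]
    by_cases hm : nei ∈ st.2
    · rw [if_pos hm]
      obtain ⟨c1, c2, c3, c4, c5, c6, c7, c8⟩ :=
        ih node V st (fun x hx => hAdj x (List.mem_cons_of_mem _ hx)) h1 h2 h3 h4 h5 h6 h7
      refine ⟨c1, ?_, c3, c4, c5, c6, c7, c8⟩
      intro x hx
      rcases List.mem_cons.1 hx with rfl | hx
      · exact c1.subset hm
      · exact c2 x hx
    · rw [if_neg hm]
      obtain ⟨d1, d2, d3, d4, d5, d6⟩ := IH nei st.2 h3 hm h7
      have hAdjnei : Adj graph node nei := hAdj nei List.mem_cons_self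
      set r' := dfsA graph fuel nei st.2 with hr'
      have hsub : ∀ x ∈ st.2, x ∈ r'.2 := fun x hx => d1.subset hx
      have hVlen : (V.length : Int) ≤ st.2.length := by exact_mod_cast h1.length_le
      have hstlen : (st.2.length : Int) ≤ r'.2.length := by exact_mod_cast d1.length_le
      obtain ⟨c1, c2, c3, c4, c5, c6, c7, c8⟩ :=
        ih node V (st.1 + r'.1, r'.2) (fun x hx => hAdj x (List.mem_cons_of_mem _ hx))
          (h1.trans d1) (hsub node h2) d3
          (by simp only [hr']; rw [d4, h4]; ring)
          (by
            intro x hx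
            rcases d5 x hx with hx' | hcg
            · exact h5 x hx'
            · exact Or.inr ((Relation.ReflTransGen.single hAdjnei).trans hcg))
          (by
            intro x hx hxV hxn y hadj
            by_cases hxst : x ∈ st.2
            · exact hsub y (h6 x hxst hxV hxn y hadj)
            · exact d6 x hx hxst y hadj)
          (by
            show (graph.keys.filter (fun k => decide (k ∉ r'.2))).length + 1 ≤ fuel
            have := filterlen_anti graph.keys hsub
            omega)
      refine ⟨d1.trans c1, ?_, c3, c4, c5, c6, c7, c8⟩
      intro x hx
      rcases List.mem_cons.1 hx with rfl | hx
      · exact c1.subset (d2)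
      · exact c2 x hx

-- master lemma about A's dfs
theorem dfs_main {graph : PySem.Dict Int (PySem.Set Int)} (hnk : graph.keys.Nodup)
    (hsym : ∀ x y, Adj graph x y → Adj graph y x) :
    ∀ (fuel : Nat) (node : Int) (V : PySem.Set Int), V.Nodup → node ∉ V →
    (graph.keys.filter (fun k => decide (k ∉ V))).length + 1 ≤ fuel →
    V <+: (dfsA graph fuel node V).2 ∧ node ∈ (dfsA graph fuel node V).2 ∧
    (dfsA graph fuel node V).2.Nodup ∧
    (dfsA graph fuel node V).1 = ((dfsA graph fuel node V).2.length : Int) - (V.length : Int) ∧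
    (∀ x ∈ (dfsA graph fuel node V).2, x ∈ V ∨ CG graph node x) ∧
    (∀ x ∈ (dfsA graph fuel node V).2, x ∉ V → ∀ y, Adj graph x y → y ∈ (dfsA graph fuel node V).2) := by
  intro fuel
  induction fuel with
  | zero => intro node V _ _ h3; omega
  | succ fuel ihf =>
    intro node V hV hnode hfuel
    have hadd : PySem.Set.add V node = V ++ [node] := PySem.Set.add_of_not_mem hnode
    have hinit1 : V <+: PySem.Set.add V node := by rw [hadd]; exact List.prefix_append _ _
    have hinit2 : node ∈ PySem.Set.add V node := (PySem.Set.mem_add _ _ _).2 (Or.inr rfl)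
    have hinit3 : (PySem.Set.add V node).Nodup := PySem.Set.nodup_add V node hV
    have hinit4 : (1 : Int) = ((PySem.Set.add V node).length : Int) - (V.length : Int) := by
      rw [hadd]; simp
    have hinit5 : ∀ x ∈ PySem.Set.add V node, x ∈ V ∨ CG graph node x := by
      intro x hx
      rcases (PySem.Set.mem_add _ _ _).1 hx with hx | rfl
      · exact Or.inl hx
      · exact Or.inr Relation.ReflTransGen.refl
    have hinit6 : ∀ x ∈ PySem.Set.add V node, x ∉ V → x ≠ node → ∀ y, Adj graph x y →
        y ∈ PySem.Set.add V node := by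
      intro x hx hxV hxn
      rcases (PySem.Set.mem_add _ _ _).1 hx with hx | rfl
      · exact absurd hx hxV
      · exact absurd rfl hxn
    by_cases hkey : node ∈ graph.keys
    · -- fuel bound after adding node
      have hfilter : graph.keys.filter (fun k => decide (k ∉ PySem.Set.add V node)) =
          (graph.keys.filter (fun k => decide (k ∉ V))).filter (fun k => k != node) := by
        rw [List.filter_filter]
        refine List.filter_congr ?_
        intro x _
        by_cases h1 : x ∈ V <;> by_cases h2 : x = node <;> simp [PySem.Set.mem_add, h1, h2]
      have hmemL : node ∈ graph.keys.filter (fun k => decide (k ∉ V)) := by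
        simp [List.mem_filter, hkey, hnode]
      have hLnd : (graph.keys.filter (fun k => decide (k ∉ V))).Nodup := hnk.filter _
      have hlen : (graph.keys.filter (fun k => decide (k ∉ PySem.Set.add V node))).length =
          (graph.keys.filter (fun k => decide (k ∉ V))).length - 1 := by
        rw [hfilter, ← hLnd.erase_eq_filter node, List.length_erase_of_mem hmemL]
      have hLpos : 1 ≤ (graph.keys.filter (fun k => decide (k ∉ V))).length :=
        List.length_pos_of_mem hmemL
      have hfuel' : (graph.keys.filter (fun k => decide (k ∉ PySem.Set.add V node))).length + 1 ≤ fuel := by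
        omega
      have H := dfs_fold fuel ihf (graph.getD node PySem.Set.empty) node V (1, PySem.Set.add V node)
        (fun x hx => hx) hinit1 hinit2 hinit3 hinit4 hinit5 hinit6 hfuel'
      obtain ⟨c1, c2, c3, c4, c5, c6, c7, c8⟩ := H
      refine ⟨hinit1.trans c1, c3, c4, c5, c6, ?_⟩
      intro x hx hxV y hadj
      by_cases hxn : x = node
      · subst hxn
        exact c2 y hadj
      · exact c7 x hx hxV hxn y hadj
    · -- node has no neighbours: getD is empty
      have hns : graph.getD node PySem.Set.empty = PySem.Set.empty := by
        apply PySem.Dict.getD_of_not_contains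
        rw [← Bool.not_eq_true]
        intro hc
        exact hkey ((PySem.Dict.contains_iff_mem_keys _ _).1 hc)
      have heq : dfsA graph (fuel+1) node V = (1, PySem.Set.add V node) := by
        show (graph.getD node PySem.Set.empty).foldl _ _ = _
        rw [hns]
        rfl
      rw [heq]
      refine ⟨hinit1, hinit2, hinit3, hinit4, hinit5, ?_⟩
      intro x hx hxV y hadj
      rcases (PySem.Set.mem_add _ _ _).1 hx with hx | rfl
      · exact absurd hx hxV
      · rw [Adj, hns] at hadj
        exact absurd hadj (List.not_mem_nil)


theorem dfs_complete {graph : PySem.Dict Int (PySem.Set Int)} (hnk : graph.keys.Nodup)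
    (hsym : ∀ x y, Adj graph x y → Adj graph y x)
    (fuel : Nat) (node : Int) (V : PySem.Set Int) (hV : V.Nodup) (hnode : node ∉ V)
    (hfuel : (graph.keys.filter (fun k => decide (k ∉ V))).length + 1 ≤ fuel)
    (hdisj : ∀ z, CG graph node z → z ∉ V) :
    ∀ x, CG graph node x → x ∈ (dfsA graph fuel node V).2 := by
  obtain ⟨h1, h2, h3, h4, h5, h6⟩ := dfs_main hnk hsym fuel node V hV hnode hfuel
  intro x hx
  induction hx with
  | refl => exact h2
  | tail hcg hadj ih => exact h6 _ ih (hdisj _ hcg) _ hadj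

-- the value appended by A's "Total" equals the value appended by B's
theorem total_eq {graph : PySem.Dict Int (PySem.Set Int)} {rep : PySem.Dict Int Int}
    {members : PySem.Dict Int (PySem.Set Int)} {E : List (Int × Int)} (a b : Int)
    (hG : GInv graph E) (hB : BInv rep members E) :
    (dfsA graph (graph.keys.length + 1) a PySem.Set.empty).1 +
      (if b ∈ (dfsA graph (graph.keys.length + 1) a PySem.Set.empty).2
        then ((0 : Int), (dfsA graph (graph.keys.length + 1) a PySem.Set.empty).2)
        else dfsA graph (graph.keys.length + 1) b (dfsA graph (graph.keys.length + 1) a PySem.Set.empty).2).1 =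
    (if rep.getD b b ≠ rep.getD a a
      then ((members.getD (rep.getD a a) (pySingleton (rep.getD a a))).length : Int) +
        ((members.getD (rep.getD b b) (pySingleton (rep.getD b b))).length : Int)
      else ((members.getD (rep.getD a a) (pySingleton (rep.getD a a))).length : Int)) := by
  obtain ⟨hnk, hadjE⟩ := hG
  obtain ⟨hid, hroot, hmemb, hnd⟩ := hB
  have hsym : ∀ x y, Adj graph x y → Adj graph y x := by
    intro x y h
    rw [hadjE] at h ⊢
    exact Or.symm h
  have hcg : ∀ x y, CG graph x y ↔ Conn E x y := cg_iff_conn hadjE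
  have hfuel0 : (graph.keys.filter (fun k => decide (k ∉ (PySem.Set.empty : PySem.Set Int)))).length + 1 ≤ graph.keys.length + 1 := by
    have := List.length_filter_le (fun k => decide (k ∉ (PySem.Set.empty : PySem.Set Int))) graph.keys
    omega
  obtain ⟨a1, a2, a3, a4, a5, a6⟩ := dfs_main hnk hsym (graph.keys.length + 1) a PySem.Set.empty
    List.nodup_nil (List.not_mem_nil) hfuel0
  set Wa := (dfsA graph (graph.keys.length + 1) a PySem.Set.empty).2 with hWa
  have hWamem : ∀ x, x ∈ Wa ↔ Conn E a x := by
    intro x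
    constructor
    · intro hx
      rcases a5 x hx with h | h
      · exact absurd h (List.not_mem_nil)
      · exact (hcg a x).1 h
    · intro hx
      exact dfs_complete hnk hsym _ a _ List.nodup_nil List.not_mem_nil hfuel0
        (fun z _ => List.not_mem_nil) x ((hcg a x).2 hx)
  have hsa_nd := hnd a
  have hlenA : Wa.length = (members.getD (rep.getD a a) (pySingleton (rep.getD a a))).length :=
    ((List.perm_ext_iff_of_nodup a3 hsa_nd).2
      (fun x => (hWamem x).trans (hmemb a x).symm)).length_eq
  have ha4' : (dfsA graph (graph.keys.length + 1) a PySem.Set.empty).1 = (Wa.length : Int) := by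
    rw [a4]; simp
  by_cases hb : b ∈ Wa
  · have hconnab : Conn E a b := (hWamem b).1 hb
    have hrab : rep.getD a a = rep.getD b b := (hroot a b).1 hconnab
    rw [if_pos hb, if_neg (by simp [hrab])]
    rw [ha4', hlenA]
    simp
  · have hnab : ¬ Conn E a b := fun h => hb ((hWamem b).2 h)
    have hrab : rep.getD b b ≠ rep.getD a a := fun h => hnab ((hroot a b).2 h.symm)
    rw [if_neg hb, if_pos hrab]
    have hfuel1 : (graph.keys.filter (fun k => decide (k ∉ Wa))).length + 1 ≤ graph.keys.length + 1 := by
      have := List.length_filter_le (fun k => decide (k ∉ Wa)) graph.keys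
      omega
    obtain ⟨b1, b2, b3, b4, b5, b6⟩ := dfs_main hnk hsym (graph.keys.length + 1) b Wa a3 hb hfuel1
    set Wb := (dfsA graph (graph.keys.length + 1) b Wa).2 with hWb
    have hdisj : ∀ z, CG graph b z → z ∉ Wa := by
      intro z hz hzW
      exact hnab (((hWamem z).1 hzW).trans (conn_symm ((hcg b z).1 hz)))
    have hWbmem : ∀ x, x ∈ Wb ↔ x ∈ Wa ∨ Conn E b x := by
      intro x
      constructor
      · intro hx
        rcases b5 x hx with h | h
        · exact Or.inl h
        · exact Or.inr ((hcg b x).1 h)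
      · rintro (h | h)
        · exact b1.subset h
        · exact dfs_complete hnk hsym _ b Wa a3 hb hfuel1 hdisj x ((hcg b x).2 h)
    have hsb_nd := hnd b
    have hdisj2 : Wa.Disjoint (members.getD (rep.getD b b) (pySingleton (rep.getD b b))) := by
      intro x hx hxs
      exact hnab (((hWamem x).1 hx).trans (conn_symm ((hmemb b x).1 hxs)))
    have happnd : (Wa ++ members.getD (rep.getD b b) (pySingleton (rep.getD b b))).Nodup :=
      List.nodup_append.2 ⟨a3, hsb_nd, fun x hx y hy hxy => hdisj2 hx (hxy ▸ hy)⟩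
    have hperm2 : List.Perm Wb (Wa ++ members.getD (rep.getD b b) (pySingleton (rep.getD b b))) :=
      (List.perm_ext_iff_of_nodup b3 happnd).2 (by
        intro x
        rw [hWbmem, List.mem_append, hmemb b x])
    have hlenB : Wb.length = Wa.length + (members.getD (rep.getD b b) (pySingleton (rep.getD b b))).length := by
      rw [hperm2.length_eq, List.length_append]
    rw [ha4', b4]
    omega

theorem main_fold (qs : List (String × Int × Int)) :
    ∀ (E : List (Int × Int)) (graph : PySem.Dict Int (PySem.Set Int)) (rep : PySem.Dict Int Int)
      (members : PySem.Dict Int (PySem.Set Int)) (res : List Int),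
    GInv graph E → BInv rep members E →
    (qs.foldl stepA (graph, res)).2 = (qs.foldl stepB ((rep, members), res)).2 := by
  induction qs with
  | nil => intro E graph rep members res _ _; rfl
  | cons q qs ih =>
    intro E graph rep members res hG hB
    obtain ⟨qt, a, b⟩ := q
    simp only [List.foldl_cons]
    by_cases hf : qt = "Friend"
    · subst hf
      simp only [stepA, stepB, if_true]
      by_cases hr : rep.getD a a = rep.getD b b
      · rw [if_neg (by simp [hr])]
        exact ih (E ++ [(a, b)]) _ rep members res (ginv_friend a b hG) (binv_same hB hr)
      · rw [if_pos hr]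
        by_cases hlen : (members.getD (rep.getD a a) (pySingleton (rep.getD a a))).length <
            (members.getD (rep.getD b b) (pySingleton (rep.getD b b))).length
        · rw [if_pos hlen]
          exact ih (E ++ [(a, b)]) _ _ _ res (ginv_friend a b hG)
            (binv_merge hB hr (rep.getD b b) (rep.getD a a) (Or.inr ⟨rfl, rfl⟩))
        · rw [if_neg hlen]
          exact ih (E ++ [(a, b)]) _ _ _ res (ginv_friend a b hG)
            (binv_merge hB hr (rep.getD a a) (rep.getD b b) (Or.inl ⟨rfl, rfl⟩))
    · by_cases ht : qt = "Total"
      · subst ht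
        simp only [stepA, stepB, if_true]
        rw [total_eq a b hG hB]
        exact ih E graph rep members _ hG hB
      · simp only [stepA, stepB]
        rw [if_neg hf, if_neg hf, if_neg ht, if_neg ht]
        exact ih E graph rep members res hG hB

-- ===== VERDICT (by name: the statement is the Claim_ definition above) =====
theorem track_friend_groups_spec : Claim_equal_track_friend_groups := by
  intro n queryType students1 students2 _
  unfold Spec_track_friend_groups track_friend_groups track_friend_groups_alt
  refine main_fold _ [] _ _ _ _ ⟨?_, ?_⟩ ⟨?_, ?_, ?_, ?_⟩
  · exact PySem.Dict.nodup_keys_empty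
  · intro x y
    unfold Adj ERel
    simp [PySem.Dict.getD_empty]
  · intro x
    simp [PySem.Dict.getD_empty]
  · intro x y
    simp [PySem.Dict.getD_empty, conn_nil]
  · intro x y
    simp only [PySem.Dict.getD_empty, pySingleton, conn_nil]
    rw [PySem.Set.mem_add]
    simp [PySem.Set.empty, eq_comm]
  · intro x
    exact PySem.Set.nodup_add _ _ List.nodup_nil
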